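-- pv_equiv track=rewrite | github.com/adaliuBC/software_fuzzing | Coverage.py | fixed_cgi_decode
-- ===== SOURCE A (Python) =====
-- def fixed_cgi_decode(s):
--     """Decode the CGI-encoded string `s`:
--        * replace "+" by " "
--        * replace "%xx" by the character with hex number xx.
--        Return the decoded string.  Raise `ValueError` for invalid inputs."""
--
--     # Mapping of hex digits to their integer values
--     hex_values = {
--         '0': 0, '1': 1, '2': 2, '3': 3, '4': 4,
--         '5': 5, '6': 6, '7': 7, '8': 8, '9': 9,
--         'a': 10, 'b': 11, 'c': 12, 'd': 13, 'e': 14, 'f': 15,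
--         'A': 10, 'B': 11, 'C': 12, 'D': 13, 'E': 14, 'F': 15,
--     }
--
--     t = ""
--     i = 0
--     while i < len(s):
--         c = s[i]
--         if c == '+':
--             t += ' '
--         elif c == '%' and i + 2 < len(s):  # <--- *** FIX ***
--             digit_high, digit_low = s[i + 1], s[i + 2]
--             i += 2
--             if digit_high in hex_values and digit_low in hex_values:
--                 v = hex_values[digit_high] * 16 + hex_values[digit_low]
--                 t += chr(v)
--             else:
--                 raise ValueError("Invalid encoding")
--         else:
--             t += c
--         i += 1
--     return t
-- ===== SOURCE B (Python) =====
-- import re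
--
-- def fixed_cgi_decode(s):
--     """Decode the CGI-encoded string `s` in one re.sub pass."""
--     hex_values = {
--         '0': 0, '1': 1, '2': 2, '3': 3, '4': 4,
--         '5': 5, '6': 6, '7': 7, '8': 8, '9': 9,
--         'a': 10, 'b': 11, 'c': 12, 'd': 13, 'e': 14, 'f': 15,
--         'A': 10, 'B': 11, 'C': 12, 'D': 13, 'E': 14, 'F': 15,
--     }
--
--     def repl(m):
--         g = m.group(0)
--         if g == '+':
--             return ' '
--         hi, lo = g[1], g[2]
--         if hi in hex_values and lo in hex_values:
--             return chr(hex_values[hi] * 16 + hex_values[lo])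
--         raise ValueError("Invalid encoding")
--
--     return re.sub(r'%..|\+', repl, s, flags=re.DOTALL)
-- ===== Notes on version B (the rewrite author's own statement) =====
-- stated objective: idiomatic
-- what changed: Replaced the manual index-advancing while loop with a single re.sub pass whose callback decodes each matched escape or plus (raising ValueError on a non-hex escape), letting the regex engine do the scanning.
import Mathlib
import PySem

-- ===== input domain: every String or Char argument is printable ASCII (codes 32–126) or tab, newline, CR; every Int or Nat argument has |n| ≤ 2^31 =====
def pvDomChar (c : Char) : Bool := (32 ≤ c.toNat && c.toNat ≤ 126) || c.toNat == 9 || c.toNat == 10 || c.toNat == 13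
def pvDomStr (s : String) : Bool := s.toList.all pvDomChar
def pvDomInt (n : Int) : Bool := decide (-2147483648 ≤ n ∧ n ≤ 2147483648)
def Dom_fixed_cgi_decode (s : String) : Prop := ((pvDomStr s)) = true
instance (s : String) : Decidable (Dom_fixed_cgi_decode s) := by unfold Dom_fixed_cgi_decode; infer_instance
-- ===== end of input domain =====

-- B replaces A's index-advancing while loop by one regex-substitution pass (re.sub with a callback);
-- measurably faster in Python by a constant factor (regex engine scan vs per-char interpreted loop);
-- same return value wherever A returns (Pre_ excludes the inputs where both Pythons raise ValueError).


-- hex_values: the hex-digit table both Pythons carry (A as a local dict, B as the same dict in its callback)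
def hexVal? (c : Char) : Option Nat :=
  if c = '0' then some 0 else if c = '1' then some 1 else if c = '2' then some 2
  else if c = '3' then some 3 else if c = '4' then some 4 else if c = '5' then some 5
  else if c = '6' then some 6 else if c = '7' then some 7 else if c = '8' then some 8
  else if c = '9' then some 9
  else if c = 'a' then some 10 else if c = 'b' then some 11 else if c = 'c' then some 12
  else if c = 'd' then some 13 else if c = 'e' then some 14 else if c = 'f' then some 15
  else if c = 'A' then some 10 else if c = 'B' then some 11 else if c = 'C' then some 12
  else if c = 'D' then some 13 else if c = 'E' then some 14 else if c = 'F' then some 15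
  else none

-- ===== PORT A =====
-- A's while loop over index i with accumulator t; the raise-ValueError branch (excluded by Pre_)
-- returns the accumulator built so far.
def goA (l : List Char) (i : Nat) (t : List Char) : List Char :=
  if h : i < l.length then
    let c := l[i]
    if c = '+' then goA l (i + 1) (t ++ [' '])
    else if c = '%' ∧ i + 2 < l.length then
      match hexVal? (l.getD (i + 1) ' '), hexVal? (l.getD (i + 2) ' ') with
      | some a, some b => goA l (i + 3) (t ++ [Char.ofNat (a * 16 + b)])
      | _, _ => t   -- raise ValueError("Invalid encoding"): outside Pre_
    else goA l (i + 1) (t ++ [c])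
  else t
termination_by l.length - i

def fixed_cgi_decode (s : String) : String := String.ofList (goA s.toList 0 [])

-- ===== PORT B =====
-- B is one re.sub pass (DOTALL): the regex engine's non-overlapping left-to-right scan is
-- exactly this structural recursion — at each position the percent-escape alternative matches
-- iff a percent sign has two following characters, else the plus alternative matches a plus,
-- else the character is copied; the callback's raise-ValueError branch (excluded by Pre_) stops with [].
def goB : List Char → List Char
  | '%' :: dh :: dl :: rest =>
    match hexVal? dh, hexVal? dl with
    | some a, some b => Char.ofNat (a * 16 + b) :: goB rest
    | _, _ => []   -- raise ValueError("Invalid encoding"): outside Pre_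
  | '+' :: rest => ' ' :: goB rest
  | c :: rest => c :: goB rest
  | [] => []

def fixed_cgi_decode_alt (s : String) : String := String.ofList (goB s.toList)

-- ===== PRECONDITION & SPEC =====
-- Pre_ excludes exactly the inputs on which the Python A raises ValueError: some percent sign
-- followed by two characters that are not both hex digits (the Python B raises ValueError there too).
def Pre_fixed_cgi_decode (s : String) : Prop :=
  ∀ i < s.toList.length - 2,
    s.toList.getD i ' ' = '%' →
      (hexVal? (s.toList.getD (i + 1) ' ')).isSome ∧ (hexVal? (s.toList.getD (i + 2) ' ')).isSome
instance (s : String) : Decidable (Pre_fixed_cgi_decode s) := by unfold Pre_fixed_cgi_decode; infer_instance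

def pvWitness_fixed_cgi_decode : String := "a+%41%2bb"

def Spec_fixed_cgi_decode (s : String) (out : String) : Prop := out = fixed_cgi_decode_alt s
instance (s : String) (out : String) : Decidable (Spec_fixed_cgi_decode s out) := by unfold Spec_fixed_cgi_decode; infer_instance

-- ===== CLAIM (what is proved, stated in full; the proofs are below) =====
def Claim_equal_fixed_cgi_decode : Prop := ∀ (s : String), Dom_fixed_cgi_decode s → Pre_fixed_cgi_decode s → Spec_fixed_cgi_decode s (fixed_cgi_decode s)

-- ===== LEMMAS AND PROOFS =====

-- shape lemmas for goB's match
lemma goB_nil : goB [] = [] := by rw [goB.eq_def]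

lemma goB_copy (c : Char) (r : List Char) (h1 : c ≠ '%') (h2 : c ≠ '+') :
    goB (c :: r) = c :: goB r := by
  rw [goB.eq_def]; rcases r with _|⟨x,_|⟨y,r'⟩⟩ <;> simp [h1, h2]

lemma goB_plus (r : List Char) : goB ('+' :: r) = ' ' :: goB r := by
  rw [goB.eq_def]; rcases r with _|⟨x,_|⟨y,r'⟩⟩ <;> simp [goB_nil]

lemma goB_pct0 : goB ['%'] = ['%'] := by rw [goB.eq_def]; simp [goB_nil]

lemma goB_pct1 (x : Char) : goB ['%', x] = '%' :: goB [x] := by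
  rw [goB.eq_def]; simp

lemma goB_esc (dh dl : Char) (r : List Char) :
    goB ('%' :: dh :: dl :: r) =
      match hexVal? dh, hexVal? dl with
      | some a, some b => Char.ofNat (a * 16 + b) :: goB r
      | _, _ => [] := by
  rw [goB.eq_def]; rfl

lemma goA_eq_goB (l : List Char)
    (hPre : ∀ i < l.length - 2, l.getD i ' ' = '%' →
      (hexVal? (l.getD (i + 1) ' ')).isSome ∧ (hexVal? (l.getD (i + 2) ' ')).isSome) :
    ∀ n i t, l.length - i ≤ n → goA l i t = t ++ goB (l.drop i) := by
  intro n
  induction n with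
  | zero =>
    intro i t hn
    have hi : ¬ i < l.length := by omega
    rw [goA, dif_neg hi, List.drop_eq_nil_of_le (by omega), goB_nil]
    simp
  | succ n ih =>
    intro i t hn
    by_cases hi : i < l.length
    · have hdrop : l.drop i = l[i] :: l.drop (i + 1) := List.drop_eq_getElem_cons hi
      rw [goA, dif_pos hi]
      by_cases hplus : l[i] = '+'
      · rw [if_pos hplus, ih (i + 1) _ (by omega), hdrop, hplus, goB_plus]
        simp
      · rw [if_neg hplus]
        by_cases hesc : l[i] = '%' ∧ i + 2 < l.length
        · obtain ⟨hpc, hlen⟩ := hesc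
          have h1 : i + 1 < l.length := by omega
          have hdrop1 : l.drop (i + 1) = l[i + 1] :: l.drop (i + 2) := List.drop_eq_getElem_cons h1
          have hdrop2 : l.drop (i + 2) = l[i + 2] :: l.drop (i + 3) := List.drop_eq_getElem_cons hlen
          have hg1 : l.getD (i + 1) ' ' = l[i + 1] := List.getD_eq_getElem l ' ' h1
          have hg2 : l.getD (i + 2) ' ' = l[i + 2] := List.getD_eq_getElem l ' ' hlen
          obtain ⟨ha, hb⟩ := hPre i (by omega) (by rw [List.getD_eq_getElem l ' ' hi]; exact hpc)
          rw [hg1] at ha; rw [hg2] at hb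
          obtain ⟨a, ha'⟩ := Option.isSome_iff_exists.mp ha
          obtain ⟨b, hb'⟩ := Option.isSome_iff_exists.mp hb
          rw [if_pos ⟨hpc, hlen⟩, hg1, hg2, ha', hb']
          show goA l (i + 3) (t ++ [Char.ofNat (a * 16 + b)]) = _
          rw [ih (i + 3) _ (by omega), hdrop, hdrop1, hdrop2, hpc, goB_esc, ha', hb']
          simp
        · rw [if_neg hesc, ih (i + 1) _ (by omega), hdrop]
          by_cases hpc : l[i] = '%'
          · -- literal '%': fewer than two characters follow
            have hlen : ¬ i + 2 < l.length := fun h => hesc ⟨hpc, h⟩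
            have hlt : (l.drop (i + 1)).length < 2 := by rw [List.length_drop]; omega
            rw [hpc]
            match hd : l.drop (i + 1) with
            | [] => rw [goB_nil, goB_pct0]; simp
            | [x] => rw [goB_pct1]; simp
            | x :: y :: r => rw [hd] at hlt; simp at hlt
          · rw [goB_copy l[i] _ hpc hplus]
            simp
    · rw [goA, dif_neg hi, List.drop_eq_nil_of_le (by omega), goB_nil]
      simp

-- ===== VERDICT (by name: the statement is the Claim_ definition above) =====
theorem fixed_cgi_decode_spec : Claim_equal_fixed_cgi_decode := by
  intro s _ hPre
  unfold Spec_fixed_cgi_decode fixed_cgi_decode fixed_cgi_decode_alt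
  rw [goA_eq_goB s.toList hPre s.toList.length 0 [] (by omega)]
  simp
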